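-- pv_equiv track=rewrite | github.com/badhope/HumanOS | backend/calculators/schwartz_calculator.py | _get_profile
-- ===== SOURCE A (Python) =====
-- from typing import Dict, List
--
-- def _get_profile(scores: Dict[str, int]) -> str:
--     sorted_dims = sorted(scores.items(), key=lambda x: x[1], reverse=True)
--     top2 = [d for d, s in sorted_dims[:2]]
--
--     if set(top2) & set(["universalism", "benevolence"]):
--         return "自我超越型"
--     elif set(top2) & set(["power", "achievement"]):
--         return "自我提升型"
--     elif set(top2) & set(["self_direction", "stimulation"]):
--         return "开放变革型"
--     else:
--         return "保守传统型"
-- ===== SOURCE B (Python) =====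
-- def _get_profile(scores):
--     # Linear top-2 selection instead of sorting the whole dict.
--     best = None
--     second = None
--     for d, s in scores.items():
--         if best is None or s > best[1]:
--             best, second = (d, s), best
--         elif second is None or s > second[1]:
--             second = (d, s)
--     top = {p[0] for p in (best, second) if p is not None}
--     for group, label in (
--         ({"universalism", "benevolence"}, "自我超越型"),
--         ({"power", "achievement"}, "自我提升型"),
--         ({"self_direction", "stimulation"}, "开放变革型"),
--     ):
--         if top & group:
--             return label
--     return "保守传统型"
-- ===== Notes on version B (the rewrite author's own statement) =====
-- stated objective: faster
-- what changed: Replaces the full reverse sort of all dimensions with a single-pass strict-greater top-2 scan (tracking best/second), then the same priority-ordered group intersection on those two names.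
import Mathlib
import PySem

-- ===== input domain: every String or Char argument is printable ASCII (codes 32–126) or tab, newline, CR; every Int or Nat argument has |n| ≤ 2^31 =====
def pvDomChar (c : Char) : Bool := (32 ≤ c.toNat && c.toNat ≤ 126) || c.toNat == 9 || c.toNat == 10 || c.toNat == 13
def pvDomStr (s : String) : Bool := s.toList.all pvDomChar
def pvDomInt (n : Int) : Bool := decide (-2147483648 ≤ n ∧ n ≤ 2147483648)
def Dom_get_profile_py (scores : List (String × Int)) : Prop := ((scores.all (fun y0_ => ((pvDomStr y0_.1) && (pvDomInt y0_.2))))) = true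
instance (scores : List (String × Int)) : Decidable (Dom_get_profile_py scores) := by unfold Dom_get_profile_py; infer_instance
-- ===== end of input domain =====

-- B replaces the full reverse sort by a one-pass strict-greater top-2 scan; same group classification.

-- ===== PORT A =====
def get_profile_py (scores : List (String × Int)) : String :=
  let sorted_dims := PySem.List.sorted scores (fun x => x.2) true
  let top2 := (PySem.List.slice sorted_dims none (some 2)).map (fun p => p.1)
  if PySem.Set.inter (PySem.Set.ofList top2) (PySem.Set.ofList ["universalism", "benevolence"]) ≠ [] then
    "自我超越型"
  else if PySem.Set.inter (PySem.Set.ofList top2) (PySem.Set.ofList ["power", "achievement"]) ≠ [] then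
    "自我提升型"
  else if PySem.Set.inter (PySem.Set.ofList top2) (PySem.Set.ofList ["self_direction", "stimulation"]) ≠ [] then
    "开放变革型"
  else
    "保守传统型"

-- ===== PORT B =====
-- one loop step of Source B: update (best, second) with the next (d, s) pair, strict '>'
def pvTopStep (st : Option (String × Int) × Option (String × Int)) (p : String × Int) :
    Option (String × Int) × Option (String × Int) :=
  if (match st.1 with | none => true | some b => decide (b.2 < p.2)) then (some p, st.1)
  else if (match st.2 with | none => true | some c => decide (c.2 < p.2)) then (st.1, some p)
  else st

def pvGroups : List (PySem.Set String × String) :=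
  [(PySem.Set.ofList ["universalism", "benevolence"], "自我超越型"),
   (PySem.Set.ofList ["power", "achievement"], "自我提升型"),
   (PySem.Set.ofList ["self_direction", "stimulation"], "开放变革型")]

def get_profile_py_alt (scores : List (String × Int)) : String :=
  let st := scores.foldl pvTopStep (none, none)
  let top : PySem.Set String := PySem.Set.ofList (([st.1, st.2].filterMap id).map (fun p => p.1))
  match pvGroups.find? (fun g => !(PySem.Set.inter top g.1).isEmpty) with
  | some g => g.2
  | none => "保守传统型"

-- ===== PRECONDITION & SPEC =====
def Spec_get_profile_py (scores : List (String × Int)) (out : String) : Prop := out = get_profile_py_alt scores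
instance (scores : List (String × Int)) (out : String) : Decidable (Spec_get_profile_py scores out) := by unfold Spec_get_profile_py; infer_instance

-- ===== CLAIM (what is proved, stated in full; the proofs are below) =====
def Claim_equal_get_profile_py : Prop := ∀ (scores : List (String × Int)), Dom_get_profile_py scores → Spec_get_profile_py scores (get_profile_py scores)

-- ===== LEMMAS AND PROOFS =====

-- first two elements of a list, as the scan state
def pvFirst2 (l : List (String × Int)) : Option (String × Int) × Option (String × Int) :=
  (l[0]?, l[1]?)

-- the reverse-sort insertion predicate used by PySem.List.sorted with key = snd, reverse = true
def pvBefore (a b : String × Int) : Bool := decide (b.2 < a.2)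

lemma pvFirst2_insertBy (p : String × Int) (acc : List (String × Int)) :
    pvFirst2 (PySem.List.insertBy pvBefore p acc) = pvTopStep (pvFirst2 acc) p := by
  match acc with
  | [] => rfl
  | [a] =>
    simp only [PySem.List.insertBy, pvBefore, pvFirst2, pvTopStep]
    by_cases h : a.2 < p.2 <;> simp [h]
  | a :: b :: t =>
    simp only [PySem.List.insertBy, pvBefore, pvFirst2, pvTopStep]
    by_cases h1 : a.2 < p.2
    · simp [h1]
    · by_cases h2 : b.2 < p.2 <;> simp [h1, h2]

lemma pvFirst2_foldl (xs : List (String × Int)) (acc : List (String × Int)) :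
    pvFirst2 (xs.foldl (fun acc x => PySem.List.insertBy pvBefore x acc) acc)
      = xs.foldl pvTopStep (pvFirst2 acc) := by
  induction xs generalizing acc with
  | nil => rfl
  | cons x xs ih => simp only [List.foldl_cons, ih, pvFirst2_insertBy]

lemma pvFirst2_sorted (scores : List (String × Int)) :
    pvFirst2 (PySem.List.sorted scores (fun x => x.2) true)
      = scores.foldl pvTopStep (none, none) := by
  rw [PySem.List.sorted_rev_eq_foldl_insertBy scores (fun x => x.2)]
  exact pvFirst2_foldl scores []

-- the two classification chains agree on any set of top names
lemma pvChains_eq (top : PySem.Set String) :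
    (if PySem.Set.inter top (PySem.Set.ofList ["universalism", "benevolence"]) ≠ [] then
      "自我超越型"
    else if PySem.Set.inter top (PySem.Set.ofList ["power", "achievement"]) ≠ [] then
      "自我提升型"
    else if PySem.Set.inter top (PySem.Set.ofList ["self_direction", "stimulation"]) ≠ [] then
      "开放变革型"
    else "保守传统型")
      = (match pvGroups.find? (fun g => !(PySem.Set.inter top g.1).isEmpty) with
        | some g => g.2
        | none => "保守传统型") := by
  simp only [pvGroups, List.find?]
  by_cases h1 : PySem.Set.inter top (PySem.Set.ofList ["universalism", "benevolence"]) = []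
  · by_cases h2 : PySem.Set.inter top (PySem.Set.ofList ["power", "achievement"]) = []
    · by_cases h3 : PySem.Set.inter top (PySem.Set.ofList ["self_direction", "stimulation"]) = []
      · simp [h1, h2, h3]
      · cases hx : PySem.Set.inter top (PySem.Set.ofList ["self_direction", "stimulation"]) with
        | nil => exact absurd hx h3
        | cons a l => simp [h1, h2]
    · cases hx : PySem.Set.inter top (PySem.Set.ofList ["power", "achievement"]) with
      | nil => exact absurd hx h2
      | cons a l => simp [h1]
  · cases hx : PySem.Set.inter top (PySem.Set.ofList ["universalism", "benevolence"]) with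
    | nil => exact absurd hx h1
    | cons a l => simp

-- A's top-2 name list equals B's name list extracted from the scan state
lemma pvTop2_names (scores : List (String × Int)) :
    (PySem.List.slice (PySem.List.sorted scores (fun x => x.2) true) none (some 2)).map (fun p => p.1)
      = (([(scores.foldl pvTopStep (none, none)).1,
           (scores.foldl pvTopStep (none, none)).2].filterMap id).map (fun p => p.1)) := by
  have h := pvFirst2_sorted scores
  rw [show ((2 : Int)) = ((2 : Nat) : Int) by rfl, PySem.List.slice_to_natCast]
  match hs : PySem.List.sorted scores (fun x => x.2) true with
  | [] => rw [hs] at h; simp [pvFirst2] at h; simp [← h]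
  | [a] => rw [hs] at h; simp [pvFirst2] at h; simp [← h]
  | a :: b :: t => rw [hs] at h; simp [pvFirst2] at h; simp [← h]

-- ===== VERDICT (by name: the statement is the Claim_ definition above) =====
theorem get_profile_py_spec : Claim_equal_get_profile_py := by
  intro scores _
  show get_profile_py scores = get_profile_py_alt scores
  simp only [get_profile_py, get_profile_py_alt]
  rw [pvTop2_names scores]
  exact pvChains_eq _
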